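-- pv_equiv track=rewrite | github.com/FlyFOV/EMG_Classification | src/DM_test.py | data_windowing
-- ===== SOURCE A (Python) =====
-- def data_windowing(data, size, interval):
--     components_list = []
--     counter = 0
--     while counter <= len(data[0]) - size:
--         component = []
--         for row in data:
--             component.append(row[counter:counter+size])
--         components_list.append(component)
--         counter = counter + interval
--     return components_list
-- ===== SOURCE B (Python) =====
-- def data_windowing(data, size, interval):
--     n = len(data[0])
--     starts = range(0, n - size + 1, interval)
--     per_row = [[row[s:s + size] for s in starts] for row in data]
--     return [list(col) for col in zip(*per_row)]
-- ===== Notes on version B (the rewrite author's own statement) =====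
-- stated objective: alternative
-- what changed: B inverts the loop nesting: it computes the window start indices once, builds a row-major list of each row's windows, and transposes with zip(*per_row) to the window-major layout, instead of A's while-loop that grows counter and scans all rows per window.
-- outside the precondition, e.g. on data_windowing([[1]], 5, 0): A returns [], B raises ValueError; on data_windowing([[1]], 5, -1): A returns [], B returns [[[1]], [[1]], [[1]]]
import Mathlib
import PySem

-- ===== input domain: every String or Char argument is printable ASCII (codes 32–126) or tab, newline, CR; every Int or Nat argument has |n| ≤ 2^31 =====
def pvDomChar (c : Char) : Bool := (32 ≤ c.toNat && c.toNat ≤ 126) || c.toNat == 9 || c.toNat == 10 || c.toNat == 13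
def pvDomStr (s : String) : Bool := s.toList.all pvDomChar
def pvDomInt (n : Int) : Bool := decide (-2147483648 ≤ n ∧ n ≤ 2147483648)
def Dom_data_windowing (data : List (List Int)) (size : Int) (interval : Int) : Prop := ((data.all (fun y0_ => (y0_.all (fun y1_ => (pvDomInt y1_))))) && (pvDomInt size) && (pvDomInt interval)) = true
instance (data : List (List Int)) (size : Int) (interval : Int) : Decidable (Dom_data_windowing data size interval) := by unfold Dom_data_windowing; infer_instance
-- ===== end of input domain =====

-- B inverts A's loop nesting: per-row window lists built from precomputed starts, then a zip-transpose; alternative decomposition, not faster.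
-- Pre_ excludes interval <= 0 (A loops forever or, when size exceeds the first row's length, returns [] while B's range() raises ValueError) and empty data (A raises IndexError).


-- ===== PORT A =====
-- A's while-loop; the `0 < interval` conjunct and the measure only make the recursion
-- total (the Python loop never terminates when interval ≤ 0 and the loop is entered).
def pvALoop (data : List (List Int)) (size : Int) (interval : Int)
    (counter : Int) (acc : List (List (List Int))) : List (List (List Int)) :=
  if _h : counter ≤ ((data.headD []).length : Int) - size ∧ 0 < interval then
    pvALoop data size interval (counter + interval)
      (acc ++ [data.map (fun row => PySem.List.slice row (some counter) (some (counter + size)))])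
  else acc
termination_by (((data.headD []).length : Int) - size - counter + 1).toNat
decreasing_by omega

def data_windowing (data : List (List Int)) (size : Int) (interval : Int) : List (List (List Int)) :=
  pvALoop data size interval 0 []

-- ===== PORT B =====
-- zip(*rows): take heads while every iterator is nonempty (truncating transpose).
def pvZipStar (rows : List (List (List Int))) : List (List (List Int)) :=
  if _h : rows ≠ [] ∧ ∀ r ∈ rows, r ≠ [] then
    rows.map (fun r => r.headD []) :: pvZipStar (rows.map (fun r => r.tail))
  else []
termination_by (rows.headD []).length
decreasing_by
  obtain ⟨h1, h2⟩ := _h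
  obtain ⟨x, xs, rfl⟩ := List.exists_cons_of_ne_nil h1
  have hx : x ≠ [] := h2 x (by simp)
  cases x with
  | nil => exact absurd rfl hx
  | cons a as => simp

def data_windowing_alt (data : List (List Int)) (size : Int) (interval : Int) : List (List (List Int)) :=
  let starts := PySem.List.pyRange 0 (((data.headD []).length : Int) - size + 1) interval
  pvZipStar (data.map (fun row => starts.map (fun s => PySem.List.slice row (some s) (some (s + size)))))

-- ===== PRECONDITION & SPEC =====
-- Pre_ excludes interval ≤ 0 (A diverges, or — only when size > len(data[0]) — returns []
-- while B's range() raises ValueError / produces a countdown) and data = [] (A raises IndexError).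
def Pre_data_windowing (data : List (List Int)) (size : Int) (interval : Int) : Prop :=
  data ≠ [] ∧ 0 < interval

instance (data : List (List Int)) (size : Int) (interval : Int) : Decidable (Pre_data_windowing data size interval) := by unfold Pre_data_windowing; infer_instance

def pvWitness_data_windowing : List (List Int) × Int × Int := ([[1, 2, 3], [4, 5, 6]], 2, 1)

def Spec_data_windowing (data : List (List Int)) (size : Int) (interval : Int) (out : List (List (List Int))) : Prop := out = data_windowing_alt data size interval
instance (data : List (List Int)) (size : Int) (interval : Int) (out : List (List (List Int))) : Decidable (Spec_data_windowing data size interval out) := by unfold Spec_data_windowing; infer_instance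

-- ===== CLAIM (what is proved, stated in full; the proofs are below) =====
def Claim_equal_data_windowing : Prop := ∀ (data : List (List Int)) (size : Int) (interval : Int), Dom_data_windowing data size interval → Pre_data_windowing data size interval → Spec_data_windowing data size interval (data_windowing data size interval)

-- ===== LEMMAS AND PROOFS =====

theorem pyRange_pos_nil (a b s : Int) (hs : 0 < s) (h : b ≤ a) :
    PySem.List.pyRange a b s = [] := by
  rw [PySem.List.pyRange_of_pos _ _ hs, if_neg (by omega)]
  simp

theorem pyRange_pos_cons (a b s : Int) (hs : 0 < s) (h : a < b) :
    PySem.List.pyRange a b s = a :: PySem.List.pyRange (a + s) b s := by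
  rw [PySem.List.pyRange_of_pos _ _ hs, PySem.List.pyRange_of_pos _ _ hs, if_pos h]
  have key : (if a + s < b then ((b - (a + s) + s - 1) / s).toNat else 0) + 1
      = ((b - a + s - 1) / s).toNat := by
    have e1 : b - a + s - 1 = (b - a - 1) + 1 * s := by ring
    have e2 : (b - a - 1 + 1 * s) / s = (b - a - 1) / s + 1 :=
      Int.add_mul_ediv_right _ _ (by omega)
    by_cases h2 : a + s < b
    · rw [if_pos h2]
      have e3 : b - (a + s) + s - 1 = b - a - 1 := by ring
      have e4 : 0 ≤ (b - a - 1) / s := Int.ediv_nonneg (by omega) (by omega)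
      rw [e3, e1, e2]
      omega
    · rw [if_neg h2]
      have e0 : (b - a - 1) / s = 0 := Int.ediv_eq_zero_of_lt (by omega) (by omega)
      rw [e1, e2, e0]
      simp
  rw [← key, List.range_succ_eq_map]
  simp only [List.map_cons, List.map_map, Nat.cast_zero, mul_zero, add_zero]
  refine congrArg _ ?_
  apply List.map_congr_left
  intro k _
  simp only [Function.comp]
  push_cast
  ring

theorem pvALoop_eq_fuel (data : List (List Int)) (size interval : Int) (hi : 0 < interval) :
    ∀ (n : Nat) (counter : Int) (acc : List (List (List Int))),
    (((data.headD []).length : Int) - size - counter + 1).toNat ≤ n →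
    pvALoop data size interval counter acc =
      acc ++ (PySem.List.pyRange counter (((data.headD []).length : Int) - size + 1) interval).map
        (fun s => data.map (fun row => PySem.List.slice row (some s) (some (s + size)))) := by
  intro n
  induction n with
  | zero =>
    intro counter acc hle
    have hc : ¬ counter ≤ ((data.headD []).length : Int) - size := by omega
    rw [pvALoop, dif_neg (fun hh => hc hh.1), pyRange_pos_nil _ _ _ hi (by omega)]
    simp
  | succ n ih =>
    intro counter acc hle
    by_cases hc : counter ≤ ((data.headD []).length : Int) - size
    · rw [pvALoop, dif_pos ⟨hc, hi⟩, ih (counter + interval) _ (by omega),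
        pyRange_pos_cons _ _ _ hi (by omega : counter < ((data.headD []).length : Int) - size + 1)]
      simp
    · rw [pvALoop, dif_neg (fun hh => hc hh.1), pyRange_pos_nil _ _ _ hi (by omega)]
      simp

theorem pvALoop_eq (data : List (List Int)) (size interval : Int) (hi : 0 < interval)
    (counter : Int) (acc : List (List (List Int))) :
    pvALoop data size interval counter acc =
      acc ++ (PySem.List.pyRange counter (((data.headD []).length : Int) - size + 1) interval).map
        (fun s => data.map (fun row => PySem.List.slice row (some s) (some (s + size)))) :=
  pvALoop_eq_fuel data size interval hi _ counter acc (le_refl _)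

theorem pvZipStar_map (data : List (List Int)) (hd : data ≠ []) (ss : List Int)
    (f : List Int → Int → List Int) :
    pvZipStar (data.map (fun r => ss.map (f r))) = ss.map (fun s => data.map (fun r => f r s)) := by
  induction ss with
  | nil =>
    rw [pvZipStar, dif_neg]
    · simp
    · rintro ⟨-, hall⟩
      obtain ⟨x, xs, rfl⟩ := List.exists_cons_of_ne_nil hd
      exact hall [] (by simp) rfl
  | cons s ss ih =>
    rw [pvZipStar, dif_pos]
    · refine congrArg₂ _ ?_ ?_
      · simp [List.map_map]
      · have htails : (data.map (fun r => (f r s) :: ss.map (f r))).map List.tail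
            = data.map (fun r => ss.map (f r)) := by simp [List.map_map]
        simpa [htails] using ih
    · constructor
      · simp [hd]
      · intro r hr
        simp only [List.mem_map] at hr
        obtain ⟨row, -, rfl⟩ := hr
        simp

-- ===== VERDICT (by name: the statement is the Claim_ definition above) =====
theorem data_windowing_spec : Claim_equal_data_windowing := by
  intro data size interval _ hpre
  unfold Spec_data_windowing data_windowing data_windowing_alt
  rw [pvALoop_eq data size interval hpre.2 0 [],
    pvZipStar_map data hpre.1
      (PySem.List.pyRange 0 (((data.headD []).length : Int) - size + 1) interval)
      (fun row s => PySem.List.slice row (some s) (some (s + size)))]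
  simp
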